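-- pv_equiv track=rewrite | github.com/xuchenAIR/pm | net.py | get_max_activity_count
-- ===== SOURCE A (Python) =====
-- def get_max_activity_count(dfg, act):
--     '''
--     get maximum count of in/out about activity
--     :param dfg:
--     :param act:
--     :return:
--     '''
--     ingoing = get_in(dfg)
--     outgoing = get_out(dfg)
--     max_value = -1
--     if act in ingoing:
--         for act2 in ingoing[act]:
--             if ingoing[act][act2] > max_value:
--                 max_value = ingoing[act][act2]
--     if act in outgoing:
--         for act2 in outgoing[act]:
--             if outgoing[act][act2] > max_value:
--                 max_value = outgoing[act][act2]
--     return max_value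
--
-- def get_in(dfg):
--     ingoing = {}
--     for el in dfg:
--         if type(el[0]) is str:
--             if not el[1] in ingoing:
--                 ingoing[el[1]] = {}
--             ingoing[el[1]][el[0]] = dfg[el]
--         else:
--             if not el[0][1] in ingoing:
--                 ingoing[el[0][1]] = {}
--             ingoing[el[0][1]][el[0][0]] = el[1]
--     return ingoing
--
-- def get_out(dfg):
--     outgoing = {}
--     for el in dfg:
--         if type(el[0]) is str:
--             if not el[0] in outgoing:
--                 outgoing[el[0]] = {}
--             outgoing[el[0]][el[1]] = dfg[el]
--         else:
--             if not el[0][0] in outgoing: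
--                 outgoing[el[0][0]] = {}
--             outgoing[el[0][0]][el[0][1]] = el[1]
--     return outgoing
-- ===== SOURCE B (Python) =====
-- def get_max_activity_count(dfg, act):
--     """Max in/out edge count for activity: one pass over the dfg dict, no
--     ingoing/outgoing dictionaries built."""
--     max_value = -1
--     for (src, tgt), value in dfg.items():
--         if (src == act or tgt == act) and value > max_value:
--             max_value = value
--     return max_value
-- ===== Notes on version B (the rewrite author's own statement) =====
-- stated objective: simpler
-- what changed: B drops the ingoing/outgoing nested-dictionary construction entirely and computes the maximum in one pass over the dfg items, updating a single accumulator when the edge touches act.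
import Mathlib
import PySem

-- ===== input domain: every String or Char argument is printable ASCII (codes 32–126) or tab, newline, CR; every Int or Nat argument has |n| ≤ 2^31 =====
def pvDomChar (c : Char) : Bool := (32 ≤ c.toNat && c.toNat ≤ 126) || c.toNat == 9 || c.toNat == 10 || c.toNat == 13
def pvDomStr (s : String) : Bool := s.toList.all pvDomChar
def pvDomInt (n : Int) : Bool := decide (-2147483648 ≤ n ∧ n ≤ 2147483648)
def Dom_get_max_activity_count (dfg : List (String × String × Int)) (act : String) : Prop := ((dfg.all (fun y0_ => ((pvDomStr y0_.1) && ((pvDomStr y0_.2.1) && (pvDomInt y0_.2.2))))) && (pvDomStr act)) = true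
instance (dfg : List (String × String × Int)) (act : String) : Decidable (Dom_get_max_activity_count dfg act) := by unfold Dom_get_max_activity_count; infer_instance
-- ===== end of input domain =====

-- B drops A's ingoing/outgoing nested-dictionary construction and computes the maximum in one pass; same return value.
-- ===== PORT A =====
-- dfg is a Python dict[(str,str),int]; both ports first materialize it as a PySem.Dict
-- (identity on association lists without duplicate keys), exactly as Python receives a dict.
def pvDictOf (dfg : List (String × String × Int)) : PySem.Dict (String × String) Int :=
  PySem.Dict.ofList (dfg.map (fun x => ((x.1, x.2.1), x.2.2)))
-- get_in: for el in dfg (keys are tuples, so the `type(el[0]) is str` branch is taken,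
-- el[0]=src, el[1]=tgt, dfg[el]=value): if tgt not in ingoing: ingoing[tgt]={}; ingoing[tgt][src]=value
def pvGetIn (l : List ((String × String) × Int)) : PySem.Dict String (PySem.Dict String Int) :=
  l.foldl (fun ing el => ing.modify el.1.2 PySem.Dict.empty (fun d => d.insert el.1.1 el.2))
    PySem.Dict.empty
-- get_out: if src not in outgoing: outgoing[src]={}; outgoing[src][tgt]=value
def pvGetOut (l : List ((String × String) × Int)) : PySem.Dict String (PySem.Dict String Int) :=
  l.foldl (fun outg el => outg.modify el.1.1 PySem.Dict.empty (fun d => d.insert el.1.2 el.2))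
    PySem.Dict.empty
def get_max_activity_count (dfg : List (String × String × Int)) (act : String) : Int :=
  let d := pvDictOf dfg
  let ingoing := pvGetIn d.items
  let outgoing := pvGetOut d.items
  -- `for act2 in ingoing[act]: … ingoing[act][act2] …`: keys are unique, so iterating the
  -- items and reading the paired value is exactly the key iteration plus lookup
  let m1 : Int :=
    match ingoing.get? act with
    | some inner => inner.items.foldl (fun m p => if p.2 > m then p.2 else m) (-1)
    | none => -1
  match outgoing.get? act with
  | some inner => inner.items.foldl (fun m p => if p.2 > m then p.2 else m) m1
  | none => m1
-- ===== PORT B =====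
def get_max_activity_count_alt (dfg : List (String × String × Int)) (act : String) : Int :=
  (pvDictOf dfg).items.foldl
    (fun m p => if (p.1.1 == act || p.1.2 == act) && decide (p.2 > m) then p.2 else m) (-1)
-- ===== PRECONDITION & SPEC =====
def Spec_get_max_activity_count (dfg : List (String × String × Int)) (act : String) (out : Int) : Prop := out = get_max_activity_count_alt dfg act
instance (dfg : List (String × String × Int)) (act : String) (out : Int) : Decidable (Spec_get_max_activity_count dfg act out) := by unfold Spec_get_max_activity_count; infer_instance
-- ===== CLAIM (what is proved, stated in full; the proofs are below) =====
def Claim_equal_get_max_activity_count : Prop := ∀ (dfg : List (String × String × Int)) (act : String), Dom_get_max_activity_count dfg act → Spec_get_max_activity_count dfg act (get_max_activity_count dfg act)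
-- ===== LEMMAS AND PROOFS =====
-- the ingoing dict at key act, as a list: exactly the in-edges of act, in order
theorem pvGetIn_getD_items (L : List ((String × String) × Int)) (act : String)
    (h : (L.map Prod.fst).Nodup) :
    ((pvGetIn L).getD act PySem.Dict.empty).items
      = (L.filter (fun p => p.1.2 == act)).map (fun p => (p.1.1, p.2)) := by
  induction L using List.reverseRecOn with
  | nil => rfl
  | append_singleton L p ih =>
    rw [List.map_append, List.nodup_append] at h
    obtain ⟨h1, -, hdisj⟩ := h
    have hp : p.1 ∉ L.map Prod.fst := fun hm => hdisj p.1 hm p.1 (by simp) rfl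
    have hfold : pvGetIn (L ++ [p])
        = (pvGetIn L).modify p.1.2 PySem.Dict.empty (fun d => d.insert p.1.1 p.2) := by
      simp [pvGetIn, List.foldl_append]
    rw [hfold, PySem.Dict.getD_modify]
    by_cases hc : act = p.1.2
    · have hnotc : ((pvGetIn L).getD act PySem.Dict.empty).contains p.1.1 = false := by
        by_contra hcon
        rw [Bool.not_eq_false, PySem.Dict.contains_iff_mem_keys, PySem.Dict.keys, ih h1] at hcon
        simp only [List.map_map, List.mem_map, List.mem_filter, Function.comp] at hcon
        obtain ⟨q, ⟨hqL, hq2⟩, hq1⟩ := hcon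
        apply hp
        have hq : q.1 = p.1 := Prod.ext hq1 (by rw [hc] at hq2; simpa using hq2)
        rw [← hq]
        exact List.mem_map_of_mem hqL
      rw [if_pos hc, ← hc]
      rw [PySem.Dict.items_insert_of_not_contains _ _ hnotc, ih h1]
      have hpt : (p.1.2 == act) = true := by simpa using hc.symm
      simp [List.filter_append, hpt]
    · rw [if_neg hc, ih h1]
      have hpf : (p.1.2 == act) = false := by simpa using fun e => hc e.symm
      simp [List.filter_append, hpf]
-- same characterization for the outgoing dict
theorem pvGetOut_getD_items (L : List ((String × String) × Int)) (act : String)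
    (h : (L.map Prod.fst).Nodup) :
    ((pvGetOut L).getD act PySem.Dict.empty).items
      = (L.filter (fun p => p.1.1 == act)).map (fun p => (p.1.2, p.2)) := by
  induction L using List.reverseRecOn with
  | nil => rfl
  | append_singleton L p ih =>
    rw [List.map_append, List.nodup_append] at h
    obtain ⟨h1, -, hdisj⟩ := h
    have hp : p.1 ∉ L.map Prod.fst := fun hm => hdisj p.1 hm p.1 (by simp) rfl
    have hfold : pvGetOut (L ++ [p])
        = (pvGetOut L).modify p.1.1 PySem.Dict.empty (fun d => d.insert p.1.2 p.2) := by
      simp [pvGetOut, List.foldl_append]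
    rw [hfold, PySem.Dict.getD_modify]
    by_cases hc : act = p.1.1
    · have hnotc : ((pvGetOut L).getD act PySem.Dict.empty).contains p.1.2 = false := by
        by_contra hcon
        rw [Bool.not_eq_false, PySem.Dict.contains_iff_mem_keys, PySem.Dict.keys, ih h1] at hcon
        simp only [List.map_map, List.mem_map, List.mem_filter, Function.comp] at hcon
        obtain ⟨q, ⟨hqL, hq1⟩, hq2⟩ := hcon
        apply hp
        have hq : q.1 = p.1 := Prod.ext (by rw [hc] at hq1; simpa using hq1) hq2
        rw [← hq]
        exact List.mem_map_of_mem hqL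
      rw [if_pos hc, ← hc]
      rw [PySem.Dict.items_insert_of_not_contains _ _ hnotc, ih h1]
      have hpt : (p.1.1 == act) = true := by simpa using hc.symm
      simp [List.filter_append, hpt]
    · rw [if_neg hc, ih h1]
      have hpf : (p.1.1 == act) = false := by simpa using fun e => hc e.symm
      simp [List.filter_append, hpf]
-- A's update step over a list of pairs is a fold of max over the values
theorem pvFoldl_step_eq_max {γ : Type} (val : γ → Int) (L : List γ) (c : Int) :
    L.foldl (fun m p => if val p > m then val p else m) c = (L.map val).foldl max c := by
  induction L generalizing c with
  | nil => rfl
  | cons h t ih =>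
    simp only [List.foldl_cons, List.map_cons]
    rw [ih]
    congr 1
    split_ifs <;> omega
-- B's guarded fold is a fold of max over the values of the filtered list
theorem pvFoldl_guard (q : ((String × String) × Int) → Bool)
    (L : List ((String × String) × Int)) (c : Int) :
    L.foldl (fun m p => if q p && decide (p.2 > m) then p.2 else m) c
      = ((L.filter q).map (fun p => p.2)).foldl max c := by
  induction L generalizing c with
  | nil => rfl
  | cons p t ih =>
    by_cases hq : q p = true
    · have hhead : (if (q p && decide (p.2 > c)) = true then p.2 else c) = max c p.2 := by
        rw [hq]; simp only [Bool.true_and, decide_eq_true_eq]; split_ifs <;> omega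
      rw [List.foldl_cons, hhead, List.filter_cons_of_pos hq, List.map_cons, List.foldl_cons, ih]
    · have hqf : q p = false := by simpa using hq
      have hhead : (if (q p && decide (p.2 > c)) = true then p.2 else c) = c := by
        rw [hqf]; simp
      rw [List.foldl_cons, hhead, List.filter_cons_of_neg (by simp [hqf]), ih]
-- folding max: bounds, and dependence on membership only
theorem pvFoldl_max_le_init (c : Int) (L : List Int) : c ≤ L.foldl max c := by
  induction L generalizing c with
  | nil => simp
  | cons h t ih => exact le_trans (le_max_left c h) (ih (max c h))
theorem pvFoldl_max_le_mem (x : Int) (L : List Int) :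
    ∀ c, x ∈ L → x ≤ L.foldl max c := by
  induction L with
  | nil => intro c hx; cases hx
  | cons h t ih =>
    intro c hx
    rcases List.mem_cons.mp hx with rfl | hx'
    · exact le_trans (le_max_right c x) (pvFoldl_max_le_init _ _)
    · exact ih _ hx'
theorem pvFoldl_max_lub (b : Int) (L : List Int) :
    ∀ c, c ≤ b → (∀ x ∈ L, x ≤ b) → L.foldl max c ≤ b := by
  induction L with
  | nil => intro c hc _; simpa
  | cons h t ih =>
    intro c hc hL
    exact ih (max c h) (max_le hc (hL h (by simp))) (fun x hx => hL x (by simp [hx]))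
theorem pvFoldl_max_congr (c : Int) (L1 L2 : List Int) (h : ∀ x, x ∈ L1 ↔ x ∈ L2) :
    L1.foldl max c = L2.foldl max c := by
  apply le_antisymm
  · exact pvFoldl_max_lub _ L1 c (pvFoldl_max_le_init c L2)
      (fun x hx => pvFoldl_max_le_mem x L2 c ((h x).mp hx))
  · exact pvFoldl_max_lub _ L2 c (pvFoldl_max_le_init c L1)
      (fun x hx => pvFoldl_max_le_mem x L1 c ((h x).mpr hx))
-- ===== VERDICT (by name: the statement is the Claim_ definition above) =====
theorem get_max_activity_count_spec : Claim_equal_get_max_activity_count := by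
  intro dfg act _
  unfold Spec_get_max_activity_count get_max_activity_count get_max_activity_count_alt
  simp only []
  set L := (pvDictOf dfg).items with hLdef
  have hnd : (L.map Prod.fst).Nodup := PySem.Dict.nodup_keys_ofList _
  -- A's two match-loops, through getD
  have hIn : ((pvGetIn L).getD act PySem.Dict.empty).items
      = (L.filter (fun p => p.1.2 == act)).map (fun p => (p.1.1, p.2)) :=
    pvGetIn_getD_items L act hnd
  have hOut : ((pvGetOut L).getD act PySem.Dict.empty).items
      = (L.filter (fun p => p.1.1 == act)).map (fun p => (p.1.2, p.2)) :=
    pvGetOut_getD_items L act hnd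
  have hmatchIn : (match (pvGetIn L).get? act with
      | some inner => inner.items.foldl (fun m p => if p.2 > m then p.2 else m) (-1)
      | none => (-1 : Int))
      = ((pvGetIn L).getD act PySem.Dict.empty).items.foldl
          (fun m p => if p.2 > m then p.2 else m) (-1) := by
    cases hg : (pvGetIn L).get? act with
    | none => rw [PySem.Dict.getD_of_get?_eq_none _ _ hg]; rfl
    | some inner => rw [PySem.Dict.getD_of_get?_eq_some _ _ hg]
  have hmatchOut : ∀ m1 : Int, (match (pvGetOut L).get? act with
      | some inner => inner.items.foldl (fun m p => if p.2 > m then p.2 else m) m1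
      | none => m1)
      = ((pvGetOut L).getD act PySem.Dict.empty).items.foldl
          (fun m p => if p.2 > m then p.2 else m) m1 := by
    intro m1
    cases hg : (pvGetOut L).get? act with
    | none => rw [PySem.Dict.getD_of_get?_eq_none _ _ hg]; rfl
    | some inner => rw [PySem.Dict.getD_of_get?_eq_some _ _ hg]
  rw [hmatchOut, hmatchIn, hIn, hOut]
  rw [pvFoldl_guard]
  rw [show (fun m (p : String × Int) => if p.2 > m then p.2 else m)
      = (fun m p => if (fun q : String × Int => q.2) p > m then (fun q : String × Int => q.2) p else m) from rfl,
    pvFoldl_step_eq_max, pvFoldl_step_eq_max, ← List.foldl_append, ← List.map_append]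
  apply pvFoldl_max_congr
  intro x
  simp only [List.mem_map, List.mem_append, List.mem_filter, beq_iff_eq, Bool.or_eq_true]
  constructor
  · rintro ⟨a, (⟨b, ⟨hbL, hb⟩, rfl⟩ | ⟨b, ⟨hbL, hb⟩, rfl⟩), rfl⟩
    · exact ⟨b, ⟨hbL, Or.inr hb⟩, rfl⟩
    · exact ⟨b, ⟨hbL, Or.inl hb⟩, rfl⟩
  · rintro ⟨b, ⟨hbL, hb | hb⟩, rfl⟩
    · exact ⟨(b.1.2, b.2), Or.inr ⟨b, ⟨hbL, hb⟩, rfl⟩, rfl⟩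
    · exact ⟨(b.1.1, b.2), Or.inl ⟨b, ⟨hbL, hb⟩, rfl⟩, rfl⟩
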